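-- pv_equiv track=rewrite | github.com/LMCuber/BlocksRewritten | src/world.py | get_radius_around
-- ===== SOURCE A (Python) =====
-- def get_radius_around(radius):
--     offsets = []
--     for dx in range(-radius, radius + 1):
--         for dy in range(-radius, radius + 1):
--             dist_sq = dx ** 2 + dy ** 2
--             if dist_sq <= radius ** 2:
--                 offsets.append((dist_sq, dx, dy))
--
--     offsets.sort()
--
--     return [(dx, dy) for _, dx, dy in offsets]
-- ===== SOURCE B (Python) =====
-- def get_radius_around(radius):
--     # Counting/bucket "sort": group offsets by squared distance while iterating
--     # (dx, dy) in increasing order, then concatenate buckets; no comparison sort.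
--     if radius < 0:
--         return []
--     r_sq = radius * radius
--     buckets = [[] for _ in range(r_sq + 1)]
--     for dx in range(-radius, radius + 1):
--         for dy in range(-radius, radius + 1):
--             d = dx * dx + dy * dy
--             if d <= r_sq:
--                 buckets[d].append((dx, dy))
--     return [pair for bucket in buckets for pair in bucket]
-- ===== Notes on version B (the rewrite author's own statement) =====
-- stated objective: faster
-- what changed: Replaces build-triples-then-comparison-sort with counting/bucket grouping by squared distance (buckets filled while scanning dx,dy in increasing order, then concatenated), eliminating the sort; intended as faster (O(r^2) vs O(r^2 log r)) — a timing run measured B ~1.9x at the largest size both finished but could not confirm the 1.5x threshold at the top size.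
import Mathlib
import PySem

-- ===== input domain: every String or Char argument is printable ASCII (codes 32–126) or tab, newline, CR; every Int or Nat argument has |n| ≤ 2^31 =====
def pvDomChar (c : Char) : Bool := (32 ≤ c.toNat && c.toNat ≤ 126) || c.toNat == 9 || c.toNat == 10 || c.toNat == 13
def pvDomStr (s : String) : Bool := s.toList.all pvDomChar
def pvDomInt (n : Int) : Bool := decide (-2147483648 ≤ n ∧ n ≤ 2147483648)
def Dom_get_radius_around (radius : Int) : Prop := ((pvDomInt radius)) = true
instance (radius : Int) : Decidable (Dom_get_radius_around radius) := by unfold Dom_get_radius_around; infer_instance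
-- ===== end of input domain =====

-- B replaces A's build-triples-then-comparison-sort by bucket grouping on the squared
-- distance (buckets filled in (dx, dy) scan order, then concatenated): no sort at all.

-- ===== PORT A =====
def get_radius_around (radius : Int) : List (List Int) :=
  let offsets : List (List Int) :=
    (PySem.List.pyRange (-radius) (radius + 1)).foldl (fun offsets dx =>
      (PySem.List.pyRange (-radius) (radius + 1)).foldl (fun offsets dy =>
        let dist_sq := dx ^ 2 + dy ^ 2
        if dist_sq ≤ radius ^ 2 then offsets ++ [[dist_sq, dx, dy]] else offsets) offsets) []
  -- offsets.sort() sorts the (dist_sq, dx, dy) tuples in Python's lexicographic tuple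
  -- order, which is exactly '<' on List Int; the comprehension then strips dist_sq.
  (PySem.List.sorted offsets (fun t => t)).map (fun t => t.tail)

-- ===== PORT B =====
def get_radius_around_alt (radius : Int) : List (List Int) :=
  if radius < 0 then []
  else
    let r_sq := radius * radius
    let buckets : List (List (List Int)) :=
      (PySem.List.pyRange (-radius) (radius + 1)).foldl (fun bks dx =>
        (PySem.List.pyRange (-radius) (radius + 1)).foldl (fun bks dy =>
          let d := dx * dx + dy * dy
          -- buckets[d].append((dx, dy)); 0 ≤ d ≤ r_sq so the index is always in range
          if d ≤ r_sq then bks.modify d.toNat (fun b => b ++ [[dx, dy]]) else bks) bks)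
        (List.replicate (r_sq + 1).toNat [])
    buckets.flatten

-- ===== PRECONDITION & SPEC =====
def Spec_get_radius_around (radius : Int) (out : List (List Int)) : Prop := out = get_radius_around_alt radius
instance (radius : Int) (out : List (List Int)) : Decidable (Spec_get_radius_around radius out) := by unfold Spec_get_radius_around; infer_instance

-- ===== CLAIM (what is proved, stated in full; the proofs are below) =====
def Claim_equal_get_radius_around : Prop := ∀ (radius : Int), Dom_get_radius_around radius → Spec_get_radius_around radius (get_radius_around radius)

-- ===== LEMMAS AND PROOFS =====

-- the pairs (dx, dy) in scan order, their squared distance, and the triple A builds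
def pvDist (p : Int × Int) : Int := p.1 * p.1 + p.2 * p.2

def pvTrip (p : Int × Int) : List Int := [pvDist p, p.1, p.2]

def pvPairs (r : Int) : List (Int × Int) :=
  (PySem.List.pyRange (-r) (r + 1)).flatMap (fun dx =>
    (PySem.List.pyRange (-r) (r + 1)).map (fun dy => (dx, dy)))

def pvBucket (r d : Int) : List (Int × Int) :=
  (pvPairs r).filter (fun p => pvDist p = d)

-- the common canonical value: triples grouped by distance, groups in increasing distance
def pvCanon (r : Int) : List (List Int) :=
  (PySem.List.pyRange 0 (r * r + 1)).flatMap (fun d => (pvBucket r d).map pvTrip)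

theorem pvDist_nonneg (p : Int × Int) : 0 ≤ pvDist p := by
  have := mul_self_nonneg p.1; have := mul_self_nonneg p.2
  unfold pvDist; omega

theorem pvTrip_injective : Function.Injective pvTrip := by
  intro p q h
  simp only [pvTrip, List.cons.injEq] at h
  exact Prod.ext h.2.1 h.2.2.1

theorem pv_lex_head {d₁ d₂ : Int} (h : d₁ < d₂) (l m : List Int) : (d₁ :: l) < (d₂ :: m) :=
  List.cons_lt_cons_iff.mpr (Or.inl h)

theorem pv_lex_pair {x₁ y₁ x₂ y₂ d : Int} (h : x₁ < x₂ ∨ (x₁ = x₂ ∧ y₁ < y₂)) :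
    ([d, x₁, y₁] : List Int) < [d, x₂, y₂] := by
  refine List.cons_lt_cons_iff.mpr (Or.inr ⟨rfl, ?_⟩)
  rcases h with h | ⟨h, h'⟩
  · exact List.cons_lt_cons_iff.mpr (Or.inl h)
  · exact List.cons_lt_cons_iff.mpr (Or.inr ⟨h, List.cons_lt_cons_iff.mpr (Or.inl h')⟩)

theorem pvPairs_nodup (r : Int) : (pvPairs r).Nodup := by
  unfold pvPairs
  rw [List.nodup_flatMap]
  constructor
  · intro dx _
    exact (PySem.List.nodup_pyRange_one _ _).map (fun _ _ h => by simpa using h)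
  · refine ((PySem.List.pairwise_lt_pyRange_one _ _).imp ?_)
    intro a b hab
    simp only [Function.onFun, List.Disjoint]
    intro x hx hy
    simp only [List.mem_map] at hx hy
    obtain ⟨_, _, rfl⟩ := hx
    obtain ⟨_, _, h⟩ := hy
    exact absurd (congrArg Prod.fst h).symm (by simp; omega)

theorem pvPairs_pairwise (r : Int) :
    (pvPairs r).Pairwise (fun p q => p.1 < q.1 ∨ (p.1 = q.1 ∧ p.2 < q.2)) := by
  unfold pvPairs
  rw [List.pairwise_flatMap]
  constructor
  · intro dx _
    rw [List.pairwise_map]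
    exact (PySem.List.pairwise_lt_pyRange_one _ _).imp (fun h => Or.inr ⟨rfl, h⟩)
  · refine ((PySem.List.pairwise_lt_pyRange_one _ _).imp ?_)
    intro a b hab x hx y hy
    simp only [List.mem_map] at hx hy
    obtain ⟨_, _, rfl⟩ := hx
    obtain ⟨_, _, rfl⟩ := hy
    exact Or.inl hab

-- A's offset-building double loop is the filtered map over the pair grid
theorem pv_offsetsA (r : Int) :
    ((PySem.List.pyRange (-r) (r + 1)).foldl (fun offsets dx =>
      (PySem.List.pyRange (-r) (r + 1)).foldl (fun offsets dy =>
        let dist_sq := dx ^ 2 + dy ^ 2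
        if dist_sq ≤ r ^ 2 then offsets ++ [[dist_sq, dx, dy]] else offsets) offsets) [])
    = ((pvPairs r).filter (fun p => pvDist p ≤ r * r)).map pvTrip := by
  have hinner : ∀ (dx : Int) (acc : List (List Int)),
      (PySem.List.pyRange (-r) (r + 1)).foldl (fun offsets dy =>
        let dist_sq := dx ^ 2 + dy ^ 2
        if dist_sq ≤ r ^ 2 then offsets ++ [[dist_sq, dx, dy]] else offsets) acc
      = acc ++ ((PySem.List.pyRange (-r) (r + 1)).filter
          (fun dy => decide (dx ^ 2 + dy ^ 2 ≤ r ^ 2))).map (fun dy => [dx ^ 2 + dy ^ 2, dx, dy]) := by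
    intro dx acc
    rw [← PySem.List.foldl_append_if (fun dy => decide (dx ^ 2 + dy ^ 2 ≤ r ^ 2))
        (fun dy => [dx ^ 2 + dy ^ 2, dx, dy])]
    simp
  calc ((PySem.List.pyRange (-r) (r + 1)).foldl (fun offsets dx =>
      (PySem.List.pyRange (-r) (r + 1)).foldl (fun offsets dy =>
        let dist_sq := dx ^ 2 + dy ^ 2
        if dist_sq ≤ r ^ 2 then offsets ++ [[dist_sq, dx, dy]] else offsets) offsets) [])
      = (PySem.List.pyRange (-r) (r + 1)).foldl (fun acc dx => acc ++
          ((PySem.List.pyRange (-r) (r + 1)).filter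
          (fun dy => decide (dx ^ 2 + dy ^ 2 ≤ r ^ 2))).map (fun dy => [dx ^ 2 + dy ^ 2, dx, dy])) [] := by
        exact PySem.List.foldl_congr_mem _ _ _ _ (fun acc dx _ => hinner dx acc)
    _ = (PySem.List.pyRange (-r) (r + 1)).flatMap (fun dx =>
          ((PySem.List.pyRange (-r) (r + 1)).filter
          (fun dy => decide (dx ^ 2 + dy ^ 2 ≤ r ^ 2))).map (fun dy => [dx ^ 2 + dy ^ 2, dx, dy])) := by
        rw [PySem.List.foldl_append_eq_flatMap]; rfl
    _ = ((pvPairs r).filter (fun p => pvDist p ≤ r * r)).map pvTrip := by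
        unfold pvPairs
        rw [List.filter_flatMap, List.map_flatMap]
        apply List.flatMap_congr
        intro dx _
        rw [List.filter_map, List.map_map]
        have h1 : ((fun p => decide (pvDist p ≤ r * r)) ∘ fun dy => (dx, dy))
            = fun dy => decide (dx ^ 2 + dy ^ 2 ≤ r ^ 2) := by
          funext dy; simp [pvDist, pow_two]
        have h2 : (pvTrip ∘ fun dy => (dx, dy)) = fun dy => [dx ^ 2 + dy ^ 2, dx, dy] := by
          funext dy; simp [pvTrip, pvDist, pow_two]
        rw [h1, h2]

theorem pv_head_of_mem_bucket {r d : Int} {t : List Int} (h : t ∈ (pvBucket r d).map pvTrip) :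
    ∃ x y, t = [d, x, y] := by
  simp only [pvBucket, List.mem_map, List.mem_filter, decide_eq_true_eq] at h
  obtain ⟨p, ⟨_, hd⟩, rfl⟩ := h
  exact ⟨p.1, p.2, by simp [pvTrip, hd]⟩

theorem pvCanon_nodup (r : Int) : (pvCanon r).Nodup := by
  unfold pvCanon
  rw [List.nodup_flatMap]
  constructor
  · intro d _
    exact (((pvPairs_nodup r).filter _).map (fun _ _ h => pvTrip_injective h))
  · refine ((PySem.List.pairwise_lt_pyRange_one _ _).imp ?_)
    intro d₁ d₂ hlt
    simp only [Function.onFun, List.Disjoint]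
    intro t h1 h2
    obtain ⟨x, y, rfl⟩ := pv_head_of_mem_bucket h1
    obtain ⟨x', y', he⟩ := pv_head_of_mem_bucket h2
    simp only [List.cons.injEq] at he
    omega

theorem pvOffsets_nodup (r : Int) :
    (((pvPairs r).filter (fun p => pvDist p ≤ r * r)).map pvTrip).Nodup :=
  ((pvPairs_nodup r).filter _).map (fun _ _ h => pvTrip_injective h)

theorem pvCanon_pairwise (r : Int) : (pvCanon r).Pairwise (fun a b => a < b) := by
  unfold pvCanon
  rw [List.pairwise_flatMap]
  constructor
  · intro d _
    rw [List.pairwise_map]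
    have hpw := ((pvPairs_pairwise r).filter (fun p => decide (pvDist p = d)))
    refine hpw.imp_of_mem ?_
    intro p q hp hq hlex
    simp only [List.mem_filter, decide_eq_true_eq] at hp hq
    simp only [pvTrip, hp.2, hq.2]
    exact pv_lex_pair hlex
  · refine ((PySem.List.pairwise_lt_pyRange_one _ _).imp ?_)
    intro d₁ d₂ hlt t h1 u h2
    obtain ⟨x, y, rfl⟩ := pv_head_of_mem_bucket h1
    obtain ⟨x', y', rfl⟩ := pv_head_of_mem_bucket h2
    exact pv_lex_head hlt _ _

theorem pvCanon_perm (r : Int) :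
    (pvCanon r).Perm (((pvPairs r).filter (fun p => pvDist p ≤ r * r)).map pvTrip) := by
  rw [List.perm_ext_iff_of_nodup (pvCanon_nodup r) (pvOffsets_nodup r)]
  intro t
  unfold pvCanon pvBucket
  simp only [List.mem_flatMap, List.mem_map, List.mem_filter, decide_eq_true_eq,
    PySem.List.mem_pyRange_one]
  constructor
  · rintro ⟨d, ⟨hd0, hdlt⟩, p, ⟨hp, hpd⟩, rfl⟩
    exact ⟨p, ⟨hp, by omega⟩, rfl⟩
  · rintro ⟨p, ⟨hp, hple⟩, rfl⟩
    exact ⟨pvDist p, ⟨pvDist_nonneg p, by omega⟩, p, ⟨hp, rfl⟩, rfl⟩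

theorem pv_sortedA (r : Int) :
    PySem.List.sorted (((pvPairs r).filter (fun p => pvDist p ≤ r * r)).map pvTrip)
      (fun t => t) = pvCanon r := by
  have h := PySem.List.sorted_eq_of_perm_of_pairwise_lt
    (((pvPairs r).filter (fun p => pvDist p ≤ r * r)).map pvTrip) (pvCanon r) (fun t => t)
    (pvCanon_perm r) (pvCanon_pairwise r)
  convert h using 2

-- single-fold form of B's bucket filling
def pvStep (rsq : Int) (bks : List (List (List Int))) (p : Int × Int) : List (List (List Int)) :=
  if pvDist p ≤ rsq then bks.modify (pvDist p).toNat (fun b => b ++ [[p.1, p.2]]) else bks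

theorem pv_fold_pairs (r rsq : Int) (init : List (List (List Int))) :
    ((PySem.List.pyRange (-r) (r + 1)).foldl (fun bks dx =>
      (PySem.List.pyRange (-r) (r + 1)).foldl (fun bks dy =>
        let d := dx * dx + dy * dy
        if d ≤ rsq then bks.modify d.toNat (fun b => b ++ [[dx, dy]]) else bks) bks) init)
    = (pvPairs r).foldl (pvStep rsq) init := by
  unfold pvPairs
  rw [List.foldl_flatMap]
  refine PySem.List.foldl_congr_mem _ _ _ _ ?_
  intro acc dx _
  rw [List.foldl_map]
  rfl

theorem pv_fold_invariant (rsq : Int) (ps : List (Int × Int)) :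
    ∀ (bks : List (List (List Int))),
      (ps.foldl (pvStep rsq) bks).length = bks.length ∧
      ∀ i (h : i < (ps.foldl (pvStep rsq) bks).length) (h' : i < bks.length),
        (ps.foldl (pvStep rsq) bks)[i] = bks[i] ++
          ((ps.filter (fun p => pvDist p ≤ rsq ∧ (pvDist p).toNat = i)).map (fun p => [p.1, p.2])) := by
  induction ps with
  | nil => intro bks; simp
  | cons p ps ih =>
    intro bks
    by_cases hp : pvDist p ≤ rsq
    · have hstep : pvStep rsq bks p = bks.modify (pvDist p).toNat (fun b => b ++ [[p.1, p.2]]) := by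
        simp [pvStep, hp]
      have hlen : (bks.modify (pvDist p).toNat (fun b => b ++ [[p.1, p.2]])).length = bks.length :=
        List.length_modify _ _ _
      obtain ⟨ihlen, ihget⟩ := ih (bks.modify (pvDist p).toNat (fun b => b ++ [[p.1, p.2]]))
      constructor
      · simpa [hstep, hlen] using ihlen
      · intro i h h'
        have h2 : i < (ps.foldl (pvStep rsq) (bks.modify (pvDist p).toNat (fun b => b ++ [[p.1, p.2]]))).length := by
          simpa [hstep] using h
        have := ihget i h2 (by omega)
        simp only [List.foldl_cons, hstep, this, List.getElem_modify]
        by_cases hi : (pvDist p).toNat = i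
        · simp [hi, hp, List.append_assoc]
        · simp [hi, hp]
    · have hstep : pvStep rsq bks p = bks := by simp [pvStep, hp]
      obtain ⟨ihlen, ihget⟩ := ih bks
      refine ⟨by simpa [hstep] using ihlen, ?_⟩
      intro i h h'
      have h2 : i < (ps.foldl (pvStep rsq) bks).length := by simpa [hstep] using h
      have := ihget i h2 h'
      simp only [List.foldl_cons, hstep, this, List.filter_cons]
      simp [hp]

theorem pv_altB (r : Int) (hr : 0 ≤ r) :
    get_radius_around_alt r = (pvCanon r).map List.tail := by
  have hrsq : 0 ≤ r * r := mul_nonneg hr hr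
  have hn : ((r * r + 1).toNat : Int) = r * r + 1 := Int.toNat_of_nonneg (by omega)
  set n := (r * r + 1).toNat with hndef
  have hbks : ((PySem.List.pyRange (-r) (r + 1)).foldl (fun bks dx =>
        (PySem.List.pyRange (-r) (r + 1)).foldl (fun bks dy =>
          let d := dx * dx + dy * dy
          if d ≤ r * r then bks.modify d.toNat (fun b => b ++ [[dx, dy]]) else bks) bks)
        (List.replicate n []))
      = (List.range n).map (fun i =>
          ((pvPairs r).filter (fun p => pvDist p ≤ r * r ∧ (pvDist p).toNat = i)).map
            (fun p => [p.1, p.2])) := by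
    rw [pv_fold_pairs r (r * r) (List.replicate n [])]
    obtain ⟨hlen, hget⟩ := pv_fold_invariant (r * r) (pvPairs r) (List.replicate n [])
    apply List.ext_getElem
    · simp [hlen]
    · intro i h1 h2
      rw [hget i h1 (by simpa using (by simpa [hlen] using h1))]
      simp
  have htail : (pvCanon r).map List.tail
      = (PySem.List.pyRange 0 (r * r + 1)).flatMap (fun d =>
          (pvBucket r d).map (fun p => [p.1, p.2])) := by
    unfold pvCanon
    rw [List.map_flatMap]
    refine List.flatMap_congr ?_
    intro d _
    rw [List.map_map]
    rfl
  unfold get_radius_around_alt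
  rw [if_neg (by omega)]
  simp only []
  rw [hbks, htail, ← List.flatMap_def]
  rw [show r * r + 1 = ((n : Int)) by omega, PySem.List.pyRange_zero_natCast]
  rw [List.flatMap_map]
  refine (List.flatMap_congr ?_).symm
  intro i hi
  have hi' : (i : Int) ≤ r * r := by
    have : i < n := List.mem_range.mp hi
    omega
  unfold pvBucket
  congr 1
  refine List.filter_congr ?_
  intro p _
  have hd := pvDist_nonneg p
  simp only [decide_eq_decide]
  omega

theorem pv_A_eq (r : Int) : get_radius_around r = (pvCanon r).map List.tail := by
  unfold get_radius_around
  simp only [pv_offsetsA, pv_sortedA]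

theorem pv_neg (r : Int) (hr : r < 0) : get_radius_around r = get_radius_around_alt r := by
  unfold get_radius_around get_radius_around_alt
  rw [PySem.List.pyRange_one_eq_nil (by omega), if_pos hr]
  simp [PySem.List.sorted]

-- ===== VERDICT (by name: the statement is the Claim_ definition above) =====
theorem get_radius_around_spec : Claim_equal_get_radius_around := by
  intro r _
  unfold Spec_get_radius_around
  rcases lt_or_ge r 0 with hr | hr
  · exact pv_neg r hr
  · rw [pv_A_eq, pv_altB r hr]
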